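-- pv_equiv track=rewrite | github.com/pypi-data/pypi-mirror-396 | packages/re-cue/re_cue-0.3.4.tar.gz/re_cue-0.3.4/reverse_engineer/analysis/security/security_analyzer.py | _determine_access_level
-- ===== SOURCE A (Python) =====
-- def _determine_access_level(role: str) -> str:
--     """Determine access level from role."""
--     role_upper = role.upper()
--
--     if any(keyword in role_upper for keyword in ["ADMIN", "ROOT", "SUPER"]):
--         return "admin"
--     elif any(keyword in role_upper for keyword in ["MANAGER", "MODERATOR", "EDITOR"]):
--         return "privileged"
--     elif any(keyword in role_upper for keyword in ["SYSTEM", "SERVICE", "API"]):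
--         return "api_integration"
--     elif any(keyword in role_upper for keyword in ["PUBLIC", "GUEST", "ANONYMOUS"]):
--         return "public"
--     else:
--         return "authenticated"
-- ===== SOURCE B (Python) =====
-- _KEYWORD_PRIORITY = {
--     "ADMIN": 0, "ROOT": 0, "SUPER": 0,
--     "MANAGER": 1, "MODERATOR": 1, "EDITOR": 1,
--     "SYSTEM": 2, "SERVICE": 2, "API": 2,
--     "PUBLIC": 3, "GUEST": 3, "ANONYMOUS": 3,
-- }
--
-- _LEVELS = ["admin", "privileged", "api_integration", "public", "authenticated"]
--
-- _KEYWORD_LENGTHS = [3, 4, 5, 6, 7, 9]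
--
--
-- def _determine_access_level(role: str) -> str:
--     """Determine access level from role by sliding a window over the
--     uppercased role and looking each candidate substring up in a
--     keyword->priority dict, keeping the best (lowest) priority seen."""
--     upper = role.upper()
--     best = 4
--     for i in range(len(upper)):
--         for length in _KEYWORD_LENGTHS:
--             p = _KEYWORD_PRIORITY.get(upper[i:i + length])
--             if p is not None and p < best:
--                 best = p
--     return _LEVELS[best]
-- ===== Notes on version B (the rewrite author's own statement) =====
-- stated objective: alternative
-- what changed: Inverts the search direction: instead of testing each of the 12 keywords for substring membership branch by branch, B slides a window over the uppercased role, looks every candidate substring of a keyword length up in a keyword-to-priority dict, keeps the minimum priority seen, and indexes a levels table with it.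
import Mathlib
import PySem

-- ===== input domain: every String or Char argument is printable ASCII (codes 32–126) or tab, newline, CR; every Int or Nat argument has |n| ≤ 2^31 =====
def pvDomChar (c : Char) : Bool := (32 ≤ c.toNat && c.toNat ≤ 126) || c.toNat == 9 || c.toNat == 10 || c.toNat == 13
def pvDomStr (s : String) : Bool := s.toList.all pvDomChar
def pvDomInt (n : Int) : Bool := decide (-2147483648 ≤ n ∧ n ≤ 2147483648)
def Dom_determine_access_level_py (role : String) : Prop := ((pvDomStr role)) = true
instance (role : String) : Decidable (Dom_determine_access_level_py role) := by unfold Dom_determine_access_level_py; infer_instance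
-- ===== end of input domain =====

-- B replaces A's keyword-in-string branch chain by the inverted search: slide a window over the
-- uppercased role, look each candidate substring up in a keyword->priority dict, keep the minimum
-- priority (alternative algorithm, same cost class).


-- ===== PORT A =====
def determine_access_level_py (role : String) : String :=
  let role_upper := PySem.Str.upper role
  if ["ADMIN", "ROOT", "SUPER"].any (fun keyword => PySem.Str.isIn keyword role_upper) then
    "admin"
  else if ["MANAGER", "MODERATOR", "EDITOR"].any (fun keyword => PySem.Str.isIn keyword role_upper) then
    "privileged"
  else if ["SYSTEM", "SERVICE", "API"].any (fun keyword => PySem.Str.isIn keyword role_upper) then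
    "api_integration"
  else if ["PUBLIC", "GUEST", "ANONYMOUS"].any (fun keyword => PySem.Str.isIn keyword role_upper) then
    "public"
  else
    "authenticated"

-- ===== PORT B =====
-- _KEYWORD_PRIORITY (a Python dict literal)
def kwPairs : List (String × Nat) :=
  [("ADMIN", 0), ("ROOT", 0), ("SUPER", 0),
   ("MANAGER", 1), ("MODERATOR", 1), ("EDITOR", 1),
   ("SYSTEM", 2), ("SERVICE", 2), ("API", 2),
   ("PUBLIC", 3), ("GUEST", 3), ("ANONYMOUS", 3)]

def kwPriority : PySem.Dict String Nat := PySem.Dict.ofList kwPairs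

-- _LEVELS
def accessLevels : List String := ["admin", "privileged", "api_integration", "public", "authenticated"]

-- _KEYWORD_LENGTHS
def kwLengths : List Int := [3, 4, 5, 6, 7, 9]

-- inner loop body: p = _KEYWORD_PRIORITY.get(upper[i:i+length]); if p is not None and p < best: best = p
def kwStepL (upper : String) (i : Int) (best : Nat) (length : Int) : Nat :=
  match PySem.Dict.get? kwPriority (PySem.Str.slice upper (some i) (some (i + length))) with
  | some p => if p < best then p else best
  | none => best

-- body of 'for i in range(len(upper))': the loop over _KEYWORD_LENGTHS
def kwStepI (upper : String) (best : Nat) (i : Int) : Nat :=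
  kwLengths.foldl (kwStepL upper i) best

def determine_access_level_py_alt (role : String) : String :=
  let upper := PySem.Str.upper role
  let best := (PySem.List.pyRange 0 (PySem.Str.len upper) 1).foldl (kwStepI upper) 4
  PySem.List.pyGetD accessLevels (best : Int) "authenticated"

-- ===== PRECONDITION & SPEC =====
def Spec_determine_access_level_py (role : String) (out : String) : Prop := out = determine_access_level_py_alt role
instance (role : String) (out : String) : Decidable (Spec_determine_access_level_py role out) := by unfold Spec_determine_access_level_py; infer_instance

-- ===== CLAIM (what is proved, stated in full; the proofs are below) =====
def Claim_equal_determine_access_level_py : Prop := ∀ (role : String), Dom_determine_access_level_py role → Spec_determine_access_level_py role (determine_access_level_py role)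

-- ===== LEMMAS AND PROOFS =====

-- "priority p occurs": some admissible window of u looks up to p in the dict
def Occ (u : String) (p : Nat) : Prop :=
  ∃ i L : Int, 0 ≤ i ∧ i < PySem.Str.len u ∧ L ∈ kwLengths ∧
    PySem.Dict.get? kwPriority (PySem.Str.slice u (some i) (some (i + L))) = some p

theorem alt_eq (role : String) : determine_access_level_py_alt role =
    PySem.List.pyGetD accessLevels
      (((PySem.List.pyRange 0 (PySem.Str.len (PySem.Str.upper role)) 1).foldl
        (kwStepI (PySem.Str.upper role)) 4 : Nat) : Int) "authenticated" := rfl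

theorem kwPriority_mk : kwPriority = PySem.Dict.mk kwPairs := by rfl

-- generic facts about min-accumulating folds
theorem pvFoldl_le_init {α : Type} (step : Nat → α → Nat) (h : ∀ b y, step b y ≤ b) :
    ∀ (l : List α) (b : Nat), l.foldl step b ≤ b := by
  intro l
  induction l with
  | nil => intro b; exact Nat.le_refl b
  | cons y l ih => intro b; exact Nat.le_trans (ih (step b y)) (h b y)

theorem pvFoldl_le_of_mem {α : Type} (step : Nat → α → Nat) (h : ∀ b y, step b y ≤ b)
    {x : α} {p : Nat} (hx : ∀ b, step b x ≤ p) :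
    ∀ (l : List α) (b : Nat), x ∈ l → l.foldl step b ≤ p := by
  intro l
  induction l with
  | nil => intro b hm; cases hm
  | cons y l ih =>
    intro b hm
    rcases List.mem_cons.mp hm with rfl | hm
    · exact Nat.le_trans (pvFoldl_le_init step h l (step b x)) (hx b)
    · exact ih (step b y) hm

theorem pvFoldl_sound {α : Type} (step : Nat → α → Nat) (P : Nat → Prop) :
    ∀ (l : List α) (b : Nat), (∀ b' y, y ∈ l → step b' y = b' ∨ P (step b' y)) →
      l.foldl step b = b ∨ P (l.foldl step b) := by
  intro l
  induction l with
  | nil => intro b _; exact Or.inl rfl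
  | cons y l ih =>
    intro b h
    rcases ih (step b y) (fun b' z hz => h b' z (List.mem_cons_of_mem y hz)) with heq | hP
    · rcases h b y (List.mem_cons_self) with hy | hP'
      · exact Or.inl (heq.trans hy)
      · exact Or.inr (heq ▸ hP')
    · exact Or.inr hP

-- the two loop bodies only ever lower the accumulator
theorem kwStepL_le_self (u : String) (i : Int) (b : Nat) (L : Int) : kwStepL u i b L ≤ b := by
  unfold kwStepL
  cases PySem.Dict.get? kwPriority (PySem.Str.slice u (some i) (some (i + L))) with
  | none => exact Nat.le_refl b
  | some p => dsimp only; split <;> omega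

theorem kwStepI_le_self (u : String) (b : Nat) (i : Int) : kwStepI u b i ≤ b :=
  pvFoldl_le_init (kwStepL u i) (kwStepL_le_self u i) kwLengths b

-- completeness of the scan: any occurring priority bounds the final accumulator
theorem best_le_of_occ {u : String} {p : Nat} (h : Occ u p) :
    (PySem.List.pyRange 0 (PySem.Str.len u) 1).foldl (kwStepI u) 4 ≤ p := by
  obtain ⟨i, L, hi0, hilt, hL, hget⟩ := h
  refine pvFoldl_le_of_mem (kwStepI u) (kwStepI_le_self u) (x := i) ?_ _ 4
    (PySem.List.mem_pyRange_one.mpr ⟨hi0, hilt⟩)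
  intro b
  refine pvFoldl_le_of_mem (kwStepL u i) (kwStepL_le_self u i) (x := L) ?_ _ b hL
  intro b'
  unfold kwStepL
  rw [hget]
  dsimp only; split <;> omega

-- soundness of the scan: the final accumulator is 4 or an occurring priority
theorem best_sound (u : String) :
    (PySem.List.pyRange 0 (PySem.Str.len u) 1).foldl (kwStepI u) 4 = 4 ∨
      Occ u ((PySem.List.pyRange 0 (PySem.Str.len u) 1).foldl (kwStepI u) 4) := by
  refine pvFoldl_sound (kwStepI u) (Occ u) _ 4 ?_
  intro b i hi
  unfold kwStepI
  refine pvFoldl_sound (kwStepL u i) (Occ u) kwLengths b ?_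
  intro b' L hL
  unfold kwStepL
  cases hget : PySem.Dict.get? kwPriority (PySem.Str.slice u (some i) (some (i + L))) with
  | none => exact Or.inl rfl
  | some p =>
    dsimp only
    split
    · obtain ⟨hi0, hilt⟩ := PySem.List.mem_pyRange_one.mp hi
      exact Or.inr ⟨i, L, hi0, hilt, hL, hget⟩
    · exact Or.inl rfl

-- a successful dict lookup exhibits a stored pair (generic, by induction on the association list)
theorem get?_mk_mem {κ ν : Type} [BEq κ] [LawfulBEq κ] (l : List (κ × ν)) (x : κ) (p : ν)
    (h : (PySem.Dict.mk l).get? x = some p) : (x, p) ∈ l := by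
  induction l with
  | nil => simp [PySem.Dict.get?] at h
  | cons kv rest ih =>
    obtain ⟨k, v⟩ := kv
    rw [PySem.Dict.get?_mk_cons] at h
    by_cases hk : (k == x) = true
    · rw [if_pos hk] at h
      obtain rfl := eq_of_beq hk
      obtain rfl : v = p := by injection h
      exact List.mem_cons_self
    · rw [if_neg hk] at h
      exact List.mem_cons_of_mem _ (ih h)

-- an infix occurs as a window
theorem infix_window {k u : List Char} (h : k <:+: u) (hk : k ≠ []) :
    ∃ i, i < u.length ∧ (u.drop i).take k.length = k := by
  obtain ⟨s, t, rfl⟩ := h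
  refine ⟨s.length, ?_, ?_⟩
  · cases k with
    | nil => exact absurd rfl hk
    | cons a l => simp
  · simp

-- a window is an infix
theorem window_infix (xs : List Char) (j m : Nat) : (xs.drop j).take m <:+: xs :=
  ((xs.drop j).take_prefix m).isInfix.trans (xs.drop_suffix j).isInfix

-- one generic step: a keyword found by A's substring test yields an occurrence for B's scan
theorem occ_of_isIn (u k : String) (p L : Nat) (hL : (L : Int) ∈ kwLengths)
    (hlen : k.toList.length = L) (hpos : 0 < L)
    (hget : PySem.Dict.get? kwPriority k = some p)
    (h : PySem.Str.isIn k u = true) : Occ u p := by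
  have hinf : k.toList <:+: u.toList := (PySem.Str.isIn_iff_infix k u).mp h
  have hk : k.toList ≠ [] := by
    intro he; rw [he] at hlen; simp at hlen; omega
  obtain ⟨i, hilt, hwin⟩ := infix_window hinf hk
  have hslice : PySem.Str.slice u (some (i : Int)) (some ((i : Int) + (L : Int))) = k := by
    apply String.toList_inj.mp
    rw [PySem.Str.toList_slice]
    show PySem.List.slice u.toList (some (i : Int)) (some ((i : Int) + (L : Int))) = k.toList
    rw [PySem.List.slice_natCast_add, ← hlen, hwin]
  refine ⟨(i : Int), (L : Int), by positivity, ?_, hL, ?_⟩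
  · rw [PySem.Str.len_eq]; exact_mod_cast hilt
  · rw [hslice]; exact hget

-- conversely: an occurrence exhibits a keyword that is an infix of u
theorem isIn_of_occ {u : String} {p : Nat} (h : Occ u p) :
    ∃ k, (k, p) ∈ kwPairs ∧ PySem.Str.isIn k u = true := by
  obtain ⟨i, L, hi0, _, hL, hget⟩ := h
  have hL0 : 0 ≤ i + L := by
    have : (3:Int) ≤ L := by fin_cases hL <;> omega
    omega
  rw [kwPriority_mk] at hget
  refine ⟨_, get?_mk_mem kwPairs _ p hget, ?_⟩
  rw [PySem.Str.isIn_iff_infix, PySem.Str.toList_slice]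
  show PySem.List.slice u.toList (some i) (some (i + L)) <:+: u.toList
  rw [PySem.List.slice_toNat u.toList hi0 hL0]
  exact window_infix u.toList i.toNat ((i + L).toNat - i.toNat)

-- group membership: which any()-branch a table entry belongs to
theorem mem_kwPairs_group (k : String) (p : Nat) (h : (k, p) ∈ kwPairs) :
    (p = 0 ∧ k ∈ ["ADMIN", "ROOT", "SUPER"]) ∨
    (p = 1 ∧ k ∈ ["MANAGER", "MODERATOR", "EDITOR"]) ∨
    (p = 2 ∧ k ∈ ["SYSTEM", "SERVICE", "API"]) ∨
    (p = 3 ∧ k ∈ ["PUBLIC", "GUEST", "ANONYMOUS"]) := by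
  simp only [kwPairs, List.mem_cons, List.not_mem_nil, or_false, Prod.mk.injEq] at h
  rcases h with ⟨rfl, rfl⟩|⟨rfl, rfl⟩|⟨rfl, rfl⟩|⟨rfl, rfl⟩|⟨rfl, rfl⟩|⟨rfl, rfl⟩|⟨rfl, rfl⟩|⟨rfl, rfl⟩|⟨rfl, rfl⟩|⟨rfl, rfl⟩|⟨rfl, rfl⟩|⟨rfl, rfl⟩ <;> simp

-- ===== main proof =====
theorem determine_access_level_py_spec : Claim_equal_determine_access_level_py := by
  intro role _
  unfold Spec_determine_access_level_py determine_access_level_py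
  rw [alt_eq]
  set u := PySem.Str.upper role with hu
  set b := (PySem.List.pyRange 0 (PySem.Str.len u) 1).foldl (kwStepI u) 4 with hb
  have hle4 : b ≤ 4 := pvFoldl_le_init (kwStepI u) (kwStepI_le_self u) _ 4
  -- soundness, phrased through the branch tests
  have hsound : ∀ p : Nat, b = p → p ≠ 4 →
      (p = 0 ∧ ["ADMIN", "ROOT", "SUPER"].any (fun keyword => PySem.Str.isIn keyword u) = true) ∨
      (p = 1 ∧ ["MANAGER", "MODERATOR", "EDITOR"].any (fun keyword => PySem.Str.isIn keyword u) = true) ∨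
      (p = 2 ∧ ["SYSTEM", "SERVICE", "API"].any (fun keyword => PySem.Str.isIn keyword u) = true) ∨
      (p = 3 ∧ ["PUBLIC", "GUEST", "ANONYMOUS"].any (fun keyword => PySem.Str.isIn keyword u) = true) := by
    intro p hp hne
    rcases best_sound u with h4 | hocc
    · exact absurd (hp ▸ h4) hne
    · rw [← hb, hp] at hocc
      obtain ⟨k, hkmem, hin⟩ := isIn_of_occ hocc
      rcases mem_kwPairs_group k p hkmem with ⟨rfl, hg⟩ | ⟨rfl, hg⟩ | ⟨rfl, hg⟩ | ⟨rfl, hg⟩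
      · exact Or.inl ⟨rfl, List.any_eq_true.mpr ⟨k, hg, hin⟩⟩
      · exact Or.inr (Or.inl ⟨rfl, List.any_eq_true.mpr ⟨k, hg, hin⟩⟩)
      · exact Or.inr (Or.inr (Or.inl ⟨rfl, List.any_eq_true.mpr ⟨k, hg, hin⟩⟩))
      · exact Or.inr (Or.inr (Or.inr ⟨rfl, List.any_eq_true.mpr ⟨k, hg, hin⟩⟩))
  -- completeness, per branch
  have hcomp : ∀ p : Nat, ∀ group : List String,
      (∀ k ∈ group, ∃ L : Nat, (L : Int) ∈ kwLengths ∧ k.toList.length = L ∧ 0 < L ∧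
        PySem.Dict.get? kwPriority k = some p) →
      group.any (fun keyword => PySem.Str.isIn keyword u) = true → b ≤ p := by
    intro p group hgrp h
    obtain ⟨k, hk, hin⟩ := List.any_eq_true.mp h
    obtain ⟨L, hL, hlen, hpos, hget⟩ := hgrp k hk
    exact best_le_of_occ (occ_of_isIn u k p L hL hlen hpos hget hin)
  by_cases h0 : ["ADMIN", "ROOT", "SUPER"].any (fun keyword => PySem.Str.isIn keyword u) = true
  · have hbe : b = 0 := by
      have := hcomp 0 _ ?_ h0
      · omega
      · intro k hk
        fin_cases hk
        · exact ⟨5, by decide, by decide, by decide, by decide⟩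
        · exact ⟨4, by decide, by decide, by decide, by decide⟩
        · exact ⟨5, by decide, by decide, by decide, by decide⟩
    rw [if_pos h0, hbe]
    decide
  · rw [if_neg h0]
    have hb0 : b ≠ 0 := fun h => by
      rcases hsound 0 h (by omega) with ⟨_, hc⟩ | ⟨hp, _⟩ | ⟨hp, _⟩ | ⟨hp, _⟩ <;> first | exact h0 hc | omega
    by_cases h1 : ["MANAGER", "MODERATOR", "EDITOR"].any (fun keyword => PySem.Str.isIn keyword u) = true
    · have hbe : b = 1 := by
        have := hcomp 1 _ ?_ h1
        · omega
        · intro k hk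
          fin_cases hk
          · exact ⟨7, by decide, by decide, by decide, by decide⟩
          · exact ⟨9, by decide, by decide, by decide, by decide⟩
          · exact ⟨6, by decide, by decide, by decide, by decide⟩
      rw [if_pos h1, hbe]
      decide
    · rw [if_neg h1]
      have hb1 : b ≠ 1 := fun h => by
        rcases hsound 1 h (by omega) with ⟨hp, _⟩ | ⟨_, hc⟩ | ⟨hp, _⟩ | ⟨hp, _⟩ <;> first | exact h1 hc | omega
      by_cases h2 : ["SYSTEM", "SERVICE", "API"].any (fun keyword => PySem.Str.isIn keyword u) = true
      · have hbe : b = 2 := by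
          have := hcomp 2 _ ?_ h2
          · omega
          · intro k hk
            fin_cases hk
            · exact ⟨6, by decide, by decide, by decide, by decide⟩
            · exact ⟨7, by decide, by decide, by decide, by decide⟩
            · exact ⟨3, by decide, by decide, by decide, by decide⟩
        rw [if_pos h2, hbe]
        decide
      · rw [if_neg h2]
        have hb2 : b ≠ 2 := fun h => by
          rcases hsound 2 h (by omega) with ⟨hp, _⟩ | ⟨hp, _⟩ | ⟨_, hc⟩ | ⟨hp, _⟩ <;> first | exact h2 hc | omega
        by_cases h3 : ["PUBLIC", "GUEST", "ANONYMOUS"].any (fun keyword => PySem.Str.isIn keyword u) = true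
        · have hbe : b = 3 := by
            have := hcomp 3 _ ?_ h3
            · omega
            · intro k hk
              fin_cases hk
              · exact ⟨6, by decide, by decide, by decide, by decide⟩
              · exact ⟨5, by decide, by decide, by decide, by decide⟩
              · exact ⟨9, by decide, by decide, by decide, by decide⟩
          rw [if_pos h3, hbe]
          decide
        · rw [if_neg h3]
          have hb3 : b ≠ 3 := fun h => by
            rcases hsound 3 h (by omega) with ⟨hp, _⟩ | ⟨hp, _⟩ | ⟨hp, _⟩ | ⟨_, hc⟩ <;> first | exact h3 hc | omega
          have hbe : b = 4 := by omega
          rw [hbe]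
          decide
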